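-- pv_equiv track=rewrite | github.com/GammaPhi/gammaphi-contracts | poker/con_poker_1_card_games_v1.py | get_next_better
-- ===== SOURCE A (Python) =====
-- def get_next_better(players: list, folded: list, all_in: list, current_better: str) -> str:
--     if len(folded) >= len(players) - 1:
--         return None # No one needs to bet, only one player left in the hand
--     if len(players) == len(all_in):
--         return None # No one needs to bet, everyone is all in
--     non_folded_players = [p for p in players if p not in folded and p not in all_in]
--     current_index = non_folded_players.index(current_better)
--     assert current_index >= 0, 'Current better has folded, which does not make sense.'
--     return non_folded_players[(current_index + 1) % len(non_folded_players)]
-- ===== SOURCE B (Python) =====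
-- def get_next_better(players: list, folded: list, all_in: list, current_better: str) -> str:
--     if len(folded) >= len(players) - 1:
--         return None  # No one needs to bet, only one player left in the hand
--     if len(players) == len(all_in):
--         return None  # No one needs to bet, everyone is all in
--     if current_better in folded or current_better in all_in or current_better not in players:
--         raise ValueError('current better is not an active player')
--     i = players.index(current_better)
--     rotated = players[i+1:] + players[:i+1]
--     for p in rotated:
--         if p not in folded and p not in all_in:
--             return p
-- ===== Notes on version B (the rewrite author's own statement) =====
-- stated objective: alternative
-- what changed: B replaces A's construction of the filtered non-folded list and modular .index lookup into it by a rotation of the original players list after current_better's position followed by a first-eligible scan.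
import Mathlib
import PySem

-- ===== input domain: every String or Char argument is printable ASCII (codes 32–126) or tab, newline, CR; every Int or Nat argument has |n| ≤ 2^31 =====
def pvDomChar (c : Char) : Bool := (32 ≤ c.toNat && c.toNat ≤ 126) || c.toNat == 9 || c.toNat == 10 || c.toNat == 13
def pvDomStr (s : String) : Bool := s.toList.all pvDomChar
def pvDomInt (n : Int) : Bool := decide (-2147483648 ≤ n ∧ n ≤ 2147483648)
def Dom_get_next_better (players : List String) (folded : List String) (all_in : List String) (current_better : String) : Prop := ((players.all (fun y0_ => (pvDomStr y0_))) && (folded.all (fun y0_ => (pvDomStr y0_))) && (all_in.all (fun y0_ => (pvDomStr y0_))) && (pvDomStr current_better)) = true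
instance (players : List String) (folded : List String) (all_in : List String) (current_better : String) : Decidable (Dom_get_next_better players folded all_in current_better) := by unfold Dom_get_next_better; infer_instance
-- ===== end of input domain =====

-- B rotates the original players list after current_better's position and returns the first
-- eligible player, instead of A's filtered-list construction plus modular index lookup
-- (objective: alternative — same cost, different traversal).

-- ===== PORT A =====
def get_next_better (players : List String) (folded : List String) (all_in : List String) (current_better : String) : Option String :=
  if (folded.length : Int) ≥ (players.length : Int) - 1 then none
  else if players.length = all_in.length then none
  else
    let non_folded_players := players.filter (fun p => !(folded.contains p) && !(all_in.contains p))
    match PySem.List.index? non_folded_players current_better with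
    | none => none  -- ValueError in Python; excluded by Pre_
    | some ci =>
        PySem.List.pyGet? non_folded_players
          (PySem.Int.mod ((ci : Int) + 1) (non_folded_players.length : Int))

-- ===== PORT B =====
def get_next_better_alt (players : List String) (folded : List String) (all_in : List String) (current_better : String) : Option String :=
  if (folded.length : Int) ≥ (players.length : Int) - 1 then none
  else if players.length = all_in.length then none
  else if folded.contains current_better || all_in.contains current_better || !(players.contains current_better) then
    none  -- ValueError in Python; excluded by Pre_
  else
    match PySem.List.index? players current_better with
    | none => none  -- unreachable (membership checked above); ValueError in Python
    | some i =>
        let rotated := PySem.List.slice players (some ((i : Int) + 1)) none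
                    ++ PySem.List.slice players none (some ((i : Int) + 1))
        rotated.find? (fun p => !(folded.contains p) && !(all_in.contains p))

-- ===== PRECONDITION & SPEC =====
-- Pre_ excludes exactly the inputs on which A raises ValueError (past both guards,
-- current_better is folded, all-in, or absent from players; B raises there too).
def Pre_get_next_better (players : List String) (folded : List String) (all_in : List String) (current_better : String) : Prop :=
  ((folded.length : Int) ≥ (players.length : Int) - 1) ∨ (players.length = all_in.length) ∨
  (current_better ∈ players ∧ folded.contains current_better = false ∧ all_in.contains current_better = false)
instance (players : List String) (folded : List String) (all_in : List String) (current_better : String) : Decidable (Pre_get_next_better players folded all_in current_better) := by unfold Pre_get_next_better; infer_instance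

def pvWitness_get_next_better : List String × List String × List String × String := (["a", "b", "c"], [], [], "b")

def Spec_get_next_better (players : List String) (folded : List String) (all_in : List String) (current_better : String) (out : Option String) : Prop := out = get_next_better_alt players folded all_in current_better
instance (players : List String) (folded : List String) (all_in : List String) (current_better : String) (out : Option String) : Decidable (Spec_get_next_better players folded all_in current_better out) := by unfold Spec_get_next_better; infer_instance

-- ===== CLAIM (what is proved, stated in full; the proofs are below) =====
def Claim_equal_get_next_better : Prop := ∀ (players : List String) (folded : List String) (all_in : List String) (current_better : String), Dom_get_next_better players folded all_in current_better → Pre_get_next_better players folded all_in current_better → Spec_get_next_better players folded all_in current_better (get_next_better players folded all_in current_better)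

-- ===== LEMMAS AND PROOFS =====

theorem find?_eq_head?_filter {α : Type} (p : α → Bool) (l : List α) :
    l.find? p = (l.filter p).head? := by
  induction l with
  | nil => rfl
  | cons x xs ih =>
      cases h : p x with
      | true => rw [List.find?_cons_of_pos h, List.filter_cons_of_pos h]; rfl
      | false =>
          have h' : ¬ p x = true := by simp [h]
          rw [List.find?_cons_of_neg h', List.filter_cons_of_neg h']; exact ih

theorem get_next_better_spec : Claim_equal_get_next_better := by
  intro players folded all_in cb _ hpre
  unfold Spec_get_next_better get_next_better get_next_better_alt
  by_cases h1 : (folded.length : Int) ≥ (players.length : Int) - 1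
  · simp [h1]
  · rw [if_neg h1, if_neg h1]
    by_cases h2 : players.length = all_in.length
    · simp [h2]
    · rw [if_neg h2, if_neg h2]
      rcases hpre with h | h | ⟨hmem, hf, ha⟩
      · exact absurd h h1
      · exact absurd h h2
      have hf' : cb ∉ folded := by simpa using hf
      have ha' : cb ∉ all_in := by simpa using ha
      rw [if_neg (by simp [hf', ha', hmem])]
      obtain ⟨i, hi⟩ := Option.isSome_iff_exists.mp
        ((PySem.List.index?_isSome_iff (xs := players) (v := cb)).mpr hmem)
      obtain ⟨pre, post, hsplit, hlen, hpre_not⟩ :=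
        (PySem.List.index?_eq_some_iff players cb i).mp hi
      subst hsplit
      subst hlen
      set elig : String → Bool := fun p => !(folded.contains p) && !(all_in.contains p) with helig_def
      have hcast : ((pre.length : Int) + 1) = (((pre.length + 1 : Nat)) : Int) := by push_cast; ring
      have hdrop : (pre ++ cb :: post).drop (pre.length + 1) = post := by
        simp [List.drop_append]
      have htake : (pre ++ cb :: post).take (pre.length + 1) = pre ++ [cb] := by
        simp [List.take_append]
      have helig_cb : elig cb = true := by simp [helig_def, hf', ha']
      have hfilter : (pre ++ cb :: post).filter elig
          = pre.filter elig ++ cb :: post.filter elig := by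
        simp [List.filter_append, helig_cb]
      have hnot_f : cb ∉ pre.filter elig := fun h => hpre_not (List.mem_of_mem_filter h)
      have hidx : PySem.List.index? (pre.filter elig ++ cb :: post.filter elig) cb
          = some (pre.filter elig).length :=
        (PySem.List.index?_eq_some_iff _ _ _).mpr ⟨pre.filter elig, post.filter elig, rfl, rfl, hnot_f⟩
      have hfilter2 : (post ++ (pre ++ [cb])).filter elig
          = post.filter elig ++ (pre.filter elig ++ [cb]) := by
        simp [List.filter_append, helig_cb]
      simp only [hi, hcast, PySem.List.slice_from_natCast, PySem.List.slice_to_natCast,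
        hdrop, htake, hfilter, hidx, find?_eq_head?_filter, hfilter2]
      set fpre := pre.filter elig with hfpre
      cases hfp : post.filter elig with
      | nil =>
          have hmod : PySem.Int.mod ((fpre.length : Int) + 1)
              (((fpre ++ cb :: ([] : List String)).length : Nat) : Int) = 0 := by
            simp [PySem.Int.mod]
          rw [hmod]
          clear_value fpre
          cases fpre <;> simp
      | cons y ys =>
          have hlen' : ((fpre ++ cb :: y :: ys).length : Nat) = fpre.length + 2 + ys.length := by
            simp; omega
          have hmod : PySem.Int.mod ((fpre.length : Int) + 1)
              (((fpre ++ cb :: y :: ys).length : Nat) : Int)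
              = (((fpre.length + 1 : Nat)) : Int) := by
            rw [PySem.Int.mod_eq_emod_of_pos (by simp; omega)]
            rw [Int.emod_eq_of_lt (by positivity) (by push_cast [hlen']; omega)]
            push_cast; ring
          rw [hmod, PySem.List.pyGet?_natCast]
          simp
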